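-- pv_equiv track=rewrite | github.com/GooglePlexs/ppp2024 | lec07/test01_very hard.py | max_rainfall_event
-- ===== SOURCE A (Python) =====
-- def max_rainfall_event(rainfall):
--
--   rain_event = []
--
--   prev_rain = 0
--   prev_rain_count = 0
--   for rain in rainfall:
--     if rain ==0:
--       if prev_rain_count > 0:
--         rain_event.append(prev_rain)
--       prev_rain = 0
--       prev_rain_count = 0
--     else:
--       prev_rain_count += 1
--       prev_rain += rain
--
--   return max(rain_event)
-- ===== SOURCE B (Python) =====
-- def max_rainfall_event(rainfall):
--     parts = []
--     cur = []
--     for r in rainfall: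
--         if r == 0:
--             parts.append(cur)
--             cur = []
--         else:
--             cur.append(r)
--     return max(sum(p) for p in parts if p)
-- ===== Notes on version B (the rewrite author's own statement) =====
-- stated objective: alternative
-- what changed: B materializes the maximal non-zero runs as segments (a list of lists, flushed at each zero) and then aggregates with filter/sum/max, instead of A's scalar running sum + counter with a conditional flush inside the loop.
import Mathlib
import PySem

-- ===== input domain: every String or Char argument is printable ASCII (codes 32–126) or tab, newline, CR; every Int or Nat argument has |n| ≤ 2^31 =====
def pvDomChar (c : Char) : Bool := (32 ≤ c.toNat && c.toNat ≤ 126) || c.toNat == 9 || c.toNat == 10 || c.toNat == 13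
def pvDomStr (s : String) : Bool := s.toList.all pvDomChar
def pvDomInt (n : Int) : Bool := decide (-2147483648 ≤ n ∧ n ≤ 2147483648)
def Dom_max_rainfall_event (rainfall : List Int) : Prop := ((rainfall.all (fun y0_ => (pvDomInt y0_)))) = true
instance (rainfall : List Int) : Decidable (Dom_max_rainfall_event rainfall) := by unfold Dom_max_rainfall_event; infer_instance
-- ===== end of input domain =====

-- B materializes the maximal non-zero runs as segments and aggregates with filter/sum/max,
-- instead of A's scalar running sum + counter with a conditional flush (alternative decomposition).


-- ===== PORT A =====
-- A's loop: state (rain_event, prev_rain, prev_rain_count); flush the running sum on each zero.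
def maxRainLoopA : List Int → List Int → Int → Int → List Int
  | [], rain_event, _, _ => rain_event
  | rain :: t, rain_event, prev_rain, prev_rain_count =>
    if rain = 0 then
      maxRainLoopA t (if prev_rain_count > 0 then rain_event ++ [prev_rain] else rain_event) 0 0
    else
      maxRainLoopA t rain_event (prev_rain + rain) (prev_rain_count + 1)

-- max(rain_event): raises on empty list — excluded by Pre_; the port defaults to 0 there.
def max_rainfall_event (rainfall : List Int) : Int :=
  (PySem.List.max? (maxRainLoopA rainfall [] 0 0) (fun y => y)).getD 0

-- ===== PORT B =====
-- B's loop: state (parts, cur); append the segment itself at each zero.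
def maxRainLoopB : List Int → List (List Int) → List Int → List (List Int)
  | [], parts, _ => parts
  | r :: t, parts, cur =>
    if r = 0 then maxRainLoopB t (parts ++ [cur]) []
    else maxRainLoopB t parts (cur ++ [r])

-- max(sum(p) for p in parts if p): filter out empty segments, map sum, take max (default 0 outside Pre_).
def max_rainfall_event_alt (rainfall : List Int) : Int :=
  (PySem.List.max?
    (((maxRainLoopB rainfall [] []).filter (fun p => !p.isEmpty)).map (fun p => p.sum))
    (fun y => y)).getD 0

-- ===== PRECONDITION & SPEC =====
-- Pre_ excludes exactly the inputs on which Python A raises ValueError (max of an empty list):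
-- those with no non-zero element followed (anywhere later) by a zero. Python B raises there too.
def Pre_max_rainfall_event (rainfall : List Int) : Prop :=
  ∃ i < rainfall.length, ∃ j < rainfall.length,
    i < j ∧ rainfall.getD i 0 ≠ 0 ∧ rainfall.getD j 0 = 0
instance (rainfall : List Int) : Decidable (Pre_max_rainfall_event rainfall) := by
  unfold Pre_max_rainfall_event; infer_instance

def pvWitness_max_rainfall_event : List Int := [3, 1, 0, 7]

def Spec_max_rainfall_event (rainfall : List Int) (out : Int) : Prop := out = max_rainfall_event_alt rainfall
instance (rainfall : List Int) (out : Int) : Decidable (Spec_max_rainfall_event rainfall out) := by unfold Spec_max_rainfall_event; infer_instance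

-- ===== CLAIM (what is proved, stated in full; the proofs are below) =====
def Claim_equal_max_rainfall_event : Prop := ∀ (rainfall : List Int), Dom_max_rainfall_event rainfall → Pre_max_rainfall_event rainfall → Spec_max_rainfall_event rainfall (max_rainfall_event rainfall)

-- ===== LEMMAS AND PROOFS =====

-- Invariant tying A's scalar state (sum, count) to B's segment state (cur):
-- A's accumulated event list is the filter/map-sum image of B's accumulated parts.
theorem maxRainLoop_eq (t : List Int) :
    ∀ (parts : List (List Int)) (cur : List Int),
    maxRainLoopA t (((parts.filter (fun p => !p.isEmpty)).map (fun p => p.sum)))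
        cur.sum (cur.length : Int)
      = ((maxRainLoopB t parts cur).filter (fun p => !p.isEmpty)).map (fun p => p.sum) := by
  induction t with
  | nil => intro parts cur; simp [maxRainLoopA, maxRainLoopB]
  | cons r t ih =>
    intro parts cur
    by_cases hr : r = 0
    · subst hr
      simp only [maxRainLoopA, maxRainLoopB]
      have hflush :
          (if ((cur.length : Int) > 0) then
              ((parts.filter (fun p => !p.isEmpty)).map (fun p => p.sum)) ++ [cur.sum]
            else ((parts.filter (fun p => !p.isEmpty)).map (fun p => p.sum)))
          = (((parts ++ [cur]).filter (fun p => !p.isEmpty)).map (fun p => p.sum)) := by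
        by_cases hc : cur = []
        · subst hc; simp
        · have hlen : (cur.length : Int) > 0 := by
            have : 0 < cur.length := List.length_pos_iff.mpr hc
            exact_mod_cast this
          simp [List.filter_append, hc]
      rw [hflush]
      simpa using ih (parts ++ [cur]) []
    · simp only [maxRainLoopA, maxRainLoopB, if_neg hr]
      have hsum : cur.sum + r = (cur ++ [r]).sum := by simp
      have hlen : (cur.length : Int) + 1 = ((cur ++ [r]).length : Int) := by
        simp
      rw [hsum, hlen]
      exact ih parts (cur ++ [r])

theorem maxRain_lists_eq (rainfall : List Int) :
    maxRainLoopA rainfall [] 0 0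
      = ((maxRainLoopB rainfall [] []).filter (fun p => !p.isEmpty)).map (fun p => p.sum) := by
  have h := maxRainLoop_eq rainfall [] []
  simpa using h

-- ===== VERDICT (by name: the statement is the Claim_ definition above) =====
theorem max_rainfall_event_spec : Claim_equal_max_rainfall_event := by
  intro rainfall _ _
  unfold Spec_max_rainfall_event max_rainfall_event max_rainfall_event_alt
  rw [maxRain_lists_eq]
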